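-- pv_equiv track=rewrite | github.com/klosoter/Sub-Five | backend/engine/rl/trainer.py | _find_matching_action
-- ===== SOURCE A (Python) =====
-- def _find_matching_action(valid_actions, bot_cards, bot_draw, bot_end):
--     """Find the index in valid_actions that matches the bot's choice."""
--     bot_card_set = frozenset(bot_cards)
--
--     for i, (cards, draw, end) in enumerate(valid_actions):
--         if end != bot_end:
--             continue
--         if end:
--             return i
--         if frozenset(cards) == bot_card_set and draw == bot_draw:
--             return i
--
--     # Fuzzy match: same cards, different draw source
--     for i, (cards, draw, end) in enumerate(valid_actions):
--         if end:
--             continue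
--         if frozenset(cards) == bot_card_set:
--             return i
--
--     return None
-- ===== SOURCE B (Python) =====
-- def _find_matching_action(valid_actions, bot_cards, bot_draw, bot_end):
--     """Find the index in valid_actions that matches the bot's choice (single pass)."""
--     bot_card_set = frozenset(bot_cards)
--     fuzzy_idx = None
--     for i, (cards, draw, end) in enumerate(valid_actions):
--         if end == bot_end and (end or (frozenset(cards) == bot_card_set and draw == bot_draw)):
--             return i
--         if fuzzy_idx is None and not end and frozenset(cards) == bot_card_set:
--             fuzzy_idx = i
--     return fuzzy_idx
-- ===== Notes on version B (the rewrite author's own statement) =====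
-- stated objective: simpler
-- what changed: Replaces A's two full scans (exact pass, then a second fuzzy pass from the start) with one single pass that returns an exact match immediately and remembers the first fuzzy (card-set-only, non-end) match in a fallback variable returned after the loop.
import Mathlib
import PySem

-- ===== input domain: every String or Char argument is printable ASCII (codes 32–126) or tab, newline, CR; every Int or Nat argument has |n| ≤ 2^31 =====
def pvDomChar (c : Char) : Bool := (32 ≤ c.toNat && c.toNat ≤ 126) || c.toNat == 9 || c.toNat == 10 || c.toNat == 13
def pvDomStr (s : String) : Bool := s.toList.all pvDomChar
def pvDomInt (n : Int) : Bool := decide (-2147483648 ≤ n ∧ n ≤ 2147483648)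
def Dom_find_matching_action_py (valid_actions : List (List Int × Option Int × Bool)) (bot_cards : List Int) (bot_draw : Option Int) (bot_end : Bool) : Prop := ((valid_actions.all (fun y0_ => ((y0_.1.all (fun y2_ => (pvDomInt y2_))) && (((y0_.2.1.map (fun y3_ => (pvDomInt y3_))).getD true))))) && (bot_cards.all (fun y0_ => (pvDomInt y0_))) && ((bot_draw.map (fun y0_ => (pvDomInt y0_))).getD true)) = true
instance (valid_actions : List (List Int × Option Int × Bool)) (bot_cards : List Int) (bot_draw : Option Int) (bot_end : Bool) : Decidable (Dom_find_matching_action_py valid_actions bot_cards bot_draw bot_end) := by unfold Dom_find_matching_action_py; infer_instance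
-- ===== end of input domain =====

-- B collapses A's two scans into a single pass with a saved fallback index ('simpler'); same return value.

-- frozenset(cards) == frozenset(bot_cards): equality as finite sets of Int (shared helper)
def pvFsetEq (a b : List Int) : Bool := a.all (fun x => b.contains x) && b.all (fun x => a.contains x)

-- ===== PORT A =====
-- first loop: exact match (end-flag must equal bot_end; truthy end returns at once)
def pvA_loop1 (bot_cards : List Int) (bot_draw : Option Int) (bot_end : Bool) :
    List (List Int × Option Int × Bool) → Int → Option Int
  | [], _ => none
  | (cards, draw, e) :: rest, i =>
    if e != bot_end then pvA_loop1 bot_cards bot_draw bot_end rest (i + 1)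
    else if e then some i
    else if pvFsetEq cards bot_cards && draw == bot_draw then some i
    else pvA_loop1 bot_cards bot_draw bot_end rest (i + 1)

-- second loop: fuzzy match (same cards, any draw, non-end)
def pvA_loop2 (bot_cards : List Int) :
    List (List Int × Option Int × Bool) → Int → Option Int
  | [], _ => none
  | (cards, _, e) :: rest, i =>
    if e then pvA_loop2 bot_cards rest (i + 1)
    else if pvFsetEq cards bot_cards then some i
    else pvA_loop2 bot_cards rest (i + 1)

def find_matching_action_py (valid_actions : List (List Int × Option Int × Bool)) (bot_cards : List Int) (bot_draw : Option Int) (bot_end : Bool) : Option Int :=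
  match pvA_loop1 bot_cards bot_draw bot_end valid_actions 0 with
  | some i => some i
  | none => pvA_loop2 bot_cards valid_actions 0

-- ===== PORT B =====
-- single pass: return exact match immediately, remember first fuzzy match in the accumulator
def pvB_loop (bot_cards : List Int) (bot_draw : Option Int) (bot_end : Bool) :
    List (List Int × Option Int × Bool) → Int → Option Int → Option Int
  | [], _, fuzzy => fuzzy
  | (cards, draw, e) :: rest, i, fuzzy =>
    if e == bot_end && (e || (pvFsetEq cards bot_cards && draw == bot_draw)) then some i
    else
      let fuzzy' := if fuzzy.isNone && !e && pvFsetEq cards bot_cards then some i else fuzzy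
      pvB_loop bot_cards bot_draw bot_end rest (i + 1) fuzzy'

def find_matching_action_py_alt (valid_actions : List (List Int × Option Int × Bool)) (bot_cards : List Int) (bot_draw : Option Int) (bot_end : Bool) : Option Int :=
  pvB_loop bot_cards bot_draw bot_end valid_actions 0 none

-- ===== PRECONDITION & SPEC =====
def Spec_find_matching_action_py (valid_actions : List (List Int × Option Int × Bool)) (bot_cards : List Int) (bot_draw : Option Int) (bot_end : Bool) (out : Option Int) : Prop := out = find_matching_action_py_alt valid_actions bot_cards bot_draw bot_end
instance (valid_actions : List (List Int × Option Int × Bool)) (bot_cards : List Int) (bot_draw : Option Int) (bot_end : Bool) (out : Option Int) : Decidable (Spec_find_matching_action_py valid_actions bot_cards bot_draw bot_end out) := by unfold Spec_find_matching_action_py; infer_instance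

-- ===== CLAIM (what is proved, stated in full; the proofs are below) =====
def Claim_equal_find_matching_action_py : Prop := ∀ (valid_actions : List (List Int × Option Int × Bool)) (bot_cards : List Int) (bot_draw : Option Int) (bot_end : Bool), Dom_find_matching_action_py valid_actions bot_cards bot_draw bot_end → Spec_find_matching_action_py valid_actions bot_cards bot_draw bot_end (find_matching_action_py valid_actions bot_cards bot_draw bot_end)

-- ===== LEMMAS AND PROOFS =====
-- Invariant for B's single pass: it equals A's first loop on the suffix, falling back to the
-- saved fuzzy index, and only then to A's second loop on the same suffix.
theorem pvB_loop_eq (bot_cards : List Int) (bot_draw : Option Int) (bot_end : Bool)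
    (l : List (List Int × Option Int × Bool)) (i : Int) (fuzzy : Option Int) :
    pvB_loop bot_cards bot_draw bot_end l i fuzzy =
      match pvA_loop1 bot_cards bot_draw bot_end l i with
      | some j => some j
      | none =>
        match fuzzy with
        | some f => some f
        | none => pvA_loop2 bot_cards l i := by
  induction l generalizing i fuzzy with
  | nil =>
    simp [pvB_loop, pvA_loop1, pvA_loop2]
    cases fuzzy <;> rfl
  | cons hd rest ih =>
    obtain ⟨cards, draw, e⟩ := hd
    simp only [pvB_loop, pvA_loop1, pvA_loop2]
    cases e <;> cases bot_end <;>
      cases hs : pvFsetEq cards bot_cards <;>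
      cases hd2 : draw == bot_draw <;>
      cases fuzzy <;>
      simp [ih]

theorem find_matching_action_py_equiv (valid_actions : List (List Int × Option Int × Bool)) (bot_cards : List Int) (bot_draw : Option Int) (bot_end : Bool) :
    find_matching_action_py valid_actions bot_cards bot_draw bot_end =
      find_matching_action_py_alt valid_actions bot_cards bot_draw bot_end := by
  unfold find_matching_action_py find_matching_action_py_alt
  rw [pvB_loop_eq]

-- ===== VERDICT (by name: the statement is the Claim_ definition above) =====
theorem find_matching_action_py_spec : Claim_equal_find_matching_action_py := by
  intro va bc bd be _
  exact find_matching_action_py_equiv va bc bd be
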